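-- pv_equiv track=rewrite | github.com/Nordo80/Python | KT/kt2/exam.py | g_happy
-- ===== SOURCE A (Python) =====
-- def g_happy(s: str):
--     """Get list of dictionaries where key is hard-coded string."""
--     counter = 0
--     counter_pairs = 0
--     in_raw = 0
--     naruto = 0
--     for a in s:
--         if a != "g" and in_raw == 1:
--             in_raw = 0
--             naruto += 1
--         if counter == "g" and a == "g" and in_raw == 1:
--             counter_pairs += 1
--             in_raw = 0
--         else:
--             counter = a
--             if counter == "g" and in_raw == 0:
--                 in_raw = 1
--
--     if counter_pairs != 0 and naruto == 0:
--         return True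
--     else:
--         return False
-- ===== SOURCE B (Python) =====
-- def g_happy(s: str):
--     # Run-length encode s, then judge the g-runs declaratively.
--     runs = []
--     for a in s:
--         if runs and runs[-1][0] == a:
--             runs[-1] = (a, runs[-1][1] + 1)
--         else:
--             runs.append((a, 1))
--     pairs = sum(n // 2 for k, n in runs if k == "g")
--     bad = any(k == "g" and n % 2 == 1 for k, n in runs[:-1])
--     return pairs != 0 and not bad
-- ===== Notes on version B (the rewrite author's own statement) =====
-- stated objective: simpler
-- what changed: Replaces A's four-variable character-by-character state machine with a run-length encoding of the string followed by a declarative judgement over the runs: pairs = sum of len//2 over g-runs, failure iff some non-final run is an odd-length g-run.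
import Mathlib
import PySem

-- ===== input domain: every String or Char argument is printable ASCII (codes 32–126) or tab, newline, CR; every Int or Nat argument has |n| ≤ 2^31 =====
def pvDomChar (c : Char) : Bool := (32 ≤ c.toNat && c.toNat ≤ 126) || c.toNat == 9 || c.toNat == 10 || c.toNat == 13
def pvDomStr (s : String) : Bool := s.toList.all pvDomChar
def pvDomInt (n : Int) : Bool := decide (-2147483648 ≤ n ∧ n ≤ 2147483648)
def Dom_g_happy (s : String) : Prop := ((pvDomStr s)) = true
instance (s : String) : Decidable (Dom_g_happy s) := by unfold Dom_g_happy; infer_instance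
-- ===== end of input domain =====

-- B re-states A's g-run state machine declaratively: run-length encode, then sum/any over the runs; same O(n) cost, simpler.

-- ===== PORT A =====
-- one iteration of A's for-loop; state = (counter, counter_pairs, in_raw, naruto);
-- counter starts as the int 0, later holds a char: modelled as Option Char (none = 0)
def g_happyStep (st : Option Char × Int × Int × Int) (a : Char) : Option Char × Int × Int × Int :=
  let counter := st.1
  let pairs := st.2.1
  let inr0 := st.2.2.1
  let nar0 := st.2.2.2
  let inr := if a ≠ 'g' ∧ inr0 = 1 then 0 else inr0
  let nar := if a ≠ 'g' ∧ inr0 = 1 then nar0 + 1 else nar0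
  if counter = some 'g' ∧ a = 'g' ∧ inr = 1 then
    (counter, pairs + 1, 0, nar)
  else
    let counter' := some a
    let inr' := if counter' = some 'g' ∧ inr = 0 then 1 else inr
    (counter', pairs, inr', nar)

def g_happy (s : String) : Bool :=
  let st := s.toList.foldl g_happyStep (none, 0, 0, 0)
  decide (st.2.1 ≠ 0 ∧ st.2.2.2 = 0)

-- ===== PORT B =====
-- B's run-length-encoding loop; 'runs' is kept in REVERSE (head = python's runs[-1],
-- which the loop updates) and reversed once at the end — the same list of runs
def g_happyRuns (racc : List (Char × Int)) (a : Char) : List (Char × Int) :=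
  match racc with
  | (k, n) :: rest => if k = a then (k, n + 1) :: rest else (a, 1) :: (k, n) :: rest
  | [] => [(a, 1)]

def g_happy_alt (s : String) : Bool :=
  let runs := (s.toList.foldl g_happyRuns []).reverse
  -- pairs = sum(n // 2 for k, n in runs if k == "g")
  let pairs := ((runs.filter (fun kn => kn.1 = 'g')).map (fun kn => PySem.Int.floordiv kn.2 2)).sum
  -- bad = any(k == "g" and n % 2 == 1 for k, n in runs[:-1])
  let bad := (PySem.List.slice runs none (some (-1))).any (fun kn => kn.1 = 'g' && PySem.Int.mod kn.2 2 == 1)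
  decide (pairs ≠ 0) && !bad

-- ===== PRECONDITION & SPEC =====
def Spec_g_happy (s : String) (out : Bool) : Prop := out = g_happy_alt s
instance (s : String) (out : Bool) : Decidable (Spec_g_happy s out) := by unfold Spec_g_happy; infer_instance

-- ===== CLAIM (what is proved, stated in full; the proofs are below) =====
def Claim_equal_g_happy : Prop := ∀ (s : String), Dom_g_happy s → Spec_g_happy s (g_happy s)

-- ===== LEMMAS AND PROOFS =====

-- is this run an odd-length g-run?
def pvIsOG (kn : Char × Int) : Bool := kn.1 = 'g' && PySem.Int.mod kn.2 2 == 1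

-- A's loop state as a function of B's (reversed) run accumulator
def pvF (racc : List (Char × Int)) : Option Char × Int × Int × Int :=
  (racc.head?.map Prod.fst,
   ((racc.filter (fun kn => kn.1 = 'g')).map (fun kn => PySem.Int.floordiv kn.2 2)).sum,
   (match racc with | kn :: _ => if pvIsOG kn then 1 else 0 | [] => 0),
   (racc.tail.countP pvIsOG : Int))

theorem pv_step (racc : List (Char × Int)) (a : Char) :
    g_happyStep (pvF racc) a = pvF (g_happyRuns racc a) := by
  have h2 : (0:Int) < 2 := by norm_num
  rcases racc with _ | ⟨⟨k, n⟩, rest⟩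
  · by_cases ha : a = 'g' <;>
      simp [pvF, g_happyStep, g_happyRuns, pvIsOG, ha, PySem.Int.mod]
  · by_cases hk : k = a
    · subst hk
      by_cases ha : k = 'g'
      · subst ha
        rcases Int.emod_two_eq n with h | h <;>
          simp [pvF, g_happyStep, g_happyRuns, pvIsOG, List.filter_cons,
            PySem.Int.mod_eq_emod_of_pos h2, PySem.Int.floordiv_eq_ediv_of_pos h2, h] <;>
          omega
      · simp [pvF, g_happyStep, g_happyRuns, pvIsOG, ha, List.filter_cons, List.countP_cons,
          PySem.Int.mod_eq_emod_of_pos h2]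
    · by_cases ha : a = 'g'
      · have hkg : ¬ k = 'g' := by rintro rfl; exact hk ha.symm
        simp [pvF, g_happyStep, g_happyRuns, pvIsOG, ha, hk, hkg, List.filter_cons,
          List.countP_cons, PySem.Int.mod_eq_emod_of_pos h2,
          PySem.Int.floordiv_eq_ediv_of_pos h2]
      · by_cases hkg : k = 'g'
        · subst hkg
          rcases Int.emod_two_eq n with h | h <;>
            simp [pvF, g_happyStep, g_happyRuns, pvIsOG, ha, hk, List.filter_cons,
              List.countP_cons, PySem.Int.mod_eq_emod_of_pos h2,
              PySem.Int.floordiv_eq_ediv_of_pos h2, h] <;>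
            omega
        · simp [pvF, g_happyStep, g_happyRuns, pvIsOG, ha, hk, hkg, List.filter_cons,
            List.countP_cons, PySem.Int.mod_eq_emod_of_pos h2]

theorem pv_fold (l : List Char) (racc : List (Char × Int)) :
    l.foldl g_happyStep (pvF racc) = pvF (l.foldl g_happyRuns racc) := by
  induction l generalizing racc with
  | nil => rfl
  | cons a l ih => simp only [List.foldl_cons, pv_step, ih]

theorem pv_count_any (t : List (Char × Int)) :
    (decide ((t.countP pvIsOG : Int) = 0)) = !t.any pvIsOG := by
  cases hb : t.any pvIsOG
  · simp only [List.any_eq_false] at hb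
    simp [List.countP_eq_zero.mpr hb]
  · simp only [List.any_eq_true] at hb
    have hp : t.countP pvIsOG ≠ 0 := by
      intro h0
      obtain ⟨x, hx, hpx⟩ := hb
      exact absurd hpx (List.countP_eq_zero.mp h0 x hx)
    simp [hp]

-- ===== VERDICT (by name: the statement is the Claim_ definition above) =====
theorem g_happy_spec : Claim_equal_g_happy := by
  intro s _
  unfold Spec_g_happy g_happy g_happy_alt
  have h := pv_fold s.toList []
  have h0 : pvF ([] : List (Char × Int)) = (none, 0, 0, 0) := rfl
  rw [h0] at h
  simp only [h]
  set racc := s.toList.foldl g_happyRuns [] with hr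
  simp only [PySem.List.slice_to_neg_one, List.dropLast_reverse, List.filter_reverse,
    List.map_reverse, List.sum_reverse, List.any_reverse, pvF]
  have hpv : (fun kn : Char × Int => decide (kn.1 = 'g') && (PySem.Int.mod kn.2 2 == 1)) = pvIsOG := by
    funext kn; rfl
  rw [hpv, Bool.decide_and, pv_count_any]
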